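-- pv_equiv track=rewrite | github.com/xhnatiuk/Sorting_Visualized | src/generate_values.py | generate_increasing
-- ===== SOURCE A (Python) =====
-- import math
-- from typing import List
--
-- def generate_increasing(quantity: int, maximum: int) -> List[int]:
--     """
--     Generates an increasing list of quantity integers between 0 and maximum inclusive.
--
--     Args:
--         quantity (int): the number of values to be generated.
--         maximum (int): the maximum permissible value size.
--
--     Returns:
--         values(List[int]): a increasing list of integers.
--     """
--     if quantity == 0:
--         return []
--     else:
--         values = []
--         step_amount = 1
--         # if more values than numbers initialize value to negative to generate 0s
--         if (maximum - quantity) < 0: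
--             value = maximum - (quantity - 1)
--         # otherwise calculate the difference between values to spread entire range
--         else:
--             step_amount = math.floor(maximum/quantity)
--             value = step_amount
--         for x in range(quantity):
--             if (value < 0):
--                 values.append(0)
--             else:
--                 values.append(value)
--             value = value + step_amount
--         return values
-- ===== SOURCE B (Python) =====
-- def generate_increasing(quantity, maximum):
--     # Build the list back-to-front: descend from the top value, stop early at zero,
--     # pad the remaining slots with zeros in bulk, then reverse.
--     if quantity == 0:
--         return []
--     out = []
--     if maximum < quantity:
--         v = maximum
--         while len(out) < quantity and v > 0:
--             out.append(v)
--             v -= 1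
--         out.extend([0] * (quantity - len(out)))
--     else:
--         step = maximum // quantity
--         v = step * quantity
--         while len(out) < quantity:
--             out.append(v)
--             v -= step
--     out.reverse()
--     return out
-- ===== Notes on version B (the rewrite author's own statement) =====
-- stated objective: alternative
-- what changed: B builds the list back-to-front: it descends from the top value (stopping early at zero in the crowded branch and padding the remaining slots with zeros in bulk) and reverses at the end, instead of A's ascending accumulation with a running value and a per-element clamp test.
import Mathlib
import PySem

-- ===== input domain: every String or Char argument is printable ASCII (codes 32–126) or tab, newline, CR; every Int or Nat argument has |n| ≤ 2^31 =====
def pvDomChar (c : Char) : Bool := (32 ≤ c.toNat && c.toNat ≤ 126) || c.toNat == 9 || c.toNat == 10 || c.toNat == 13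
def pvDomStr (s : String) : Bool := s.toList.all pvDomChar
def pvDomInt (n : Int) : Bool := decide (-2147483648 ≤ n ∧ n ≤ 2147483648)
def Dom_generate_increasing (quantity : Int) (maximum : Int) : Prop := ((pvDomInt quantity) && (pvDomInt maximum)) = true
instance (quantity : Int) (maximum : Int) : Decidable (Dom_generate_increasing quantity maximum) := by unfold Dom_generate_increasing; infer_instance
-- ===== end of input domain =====

-- B builds the list back-to-front (descend from the top value, early stop at zero,
-- bulk zero padding, final reverse) instead of A's ascending clamped accumulation;
-- objective: alternative. Equal return values on all of Dom.

-- ===== PORT A =====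
-- math.floor(maximum/quantity) is ported as integer floor division PySem.Int.floordiv:
-- exact on Dom (|ints| ≤ 2^31, so the float quotient never rounds across an integer).
def generate_increasing (quantity : Int) (maximum : Int) : List Int :=
  if quantity == 0 then []
  else
    let sv : Int × Int :=
      if maximum - quantity < 0 then (1, maximum - (quantity - 1))
      else (PySem.Int.floordiv maximum quantity, PySem.Int.floordiv maximum quantity)
    ((PySem.List.pyRange 0 quantity 1).foldl
      (fun (st : List Int × Int) _ =>
        (st.1 ++ [if st.2 < 0 then 0 else st.2], st.2 + sv.1))
      ([], sv.2)).1

-- ===== PORT B =====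
-- 'while len(out) < quantity and v > 0: out.append(v); v -= 1' — the fuel is the
-- number of still-empty slots, quantity - len(out) (toNat: no iterations if quantity ≤ 0).
def pvDown1 : Int → Nat → List Int → List Int
  | _, 0, out => out
  | v, n+1, out => if 0 < v then pvDown1 (v-1) n (out ++ [v]) else out

-- 'while len(out) < quantity: out.append(v); v -= step', same fuel discipline.
def pvDown2 (s : Int) : Int → Nat → List Int → List Int
  | _, 0, out => out
  | v, n+1, out => pvDown2 s (v-s) n (out ++ [v])

def generate_increasing_alt (quantity : Int) (maximum : Int) : List Int :=
  if quantity == 0 then []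
  else if maximum < quantity then
    let out := pvDown1 maximum quantity.toNat []
    (out ++ List.replicate (quantity.toNat - out.length) 0).reverse
  else
    let step := PySem.Int.floordiv maximum quantity
    (pvDown2 step (step * quantity) quantity.toNat []).reverse

-- ===== PRECONDITION & SPEC =====
def Spec_generate_increasing (quantity : Int) (maximum : Int) (out : List Int) : Prop := out = generate_increasing_alt quantity maximum
instance (quantity : Int) (maximum : Int) (out : List Int) : Decidable (Spec_generate_increasing quantity maximum out) := by unfold Spec_generate_increasing; infer_instance

-- ===== CLAIM (what is proved, stated in full; the proofs are below) =====
def Claim_equal_generate_increasing : Prop := ∀ (quantity : Int) (maximum : Int), Dom_generate_increasing quantity maximum → Spec_generate_increasing quantity maximum (generate_increasing quantity maximum)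

-- ===== LEMMAS AND PROOFS =====

-- A's loop in closed form: starting from (acc, v) with fixed step s, n iterations
-- append the clamped arithmetic progression v, v+s, …, v+(n-1)s.
theorem pvLoopA (s : Int) (n : Nat) : ∀ (v : Int) (acc : List Int),
    (List.range n).foldl
      (fun (st : List Int × Int) _ => (st.1 ++ [if st.2 < 0 then 0 else st.2], st.2 + s))
      (acc, v)
    = (acc ++ (List.range n).map (fun (i : Nat) => if v + s * (i : Int) < 0 then 0 else v + s * (i : Int)),
       v + s * n) := by
  induction n with
  | zero => intro v acc; simp
  | succ n ih =>
    intro v acc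
    rw [List.range_succ, List.foldl_append, List.map_append, ih v acc]
    simp only [List.foldl_cons, List.foldl_nil, List.map_cons, List.map_nil, Prod.mk.injEq,
      List.append_assoc]
    exact ⟨by simp, by push_cast; ring⟩

-- B's descending loop with early stop: it collects v, v-1, … down to 1, but at most n of them.
theorem pvDown1_eq (n : Nat) : ∀ (v : Int) (out : List Int),
    pvDown1 v n out = out ++ (List.range (min n v.toNat)).map (fun (i : Nat) => v - (i : Int)) := by
  induction n with
  | zero => intro v out; simp [pvDown1]
  | succ n ih =>
    intro v out
    by_cases hv : 0 < v
    · rw [pvDown1, if_pos hv, ih]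
      have hk : min (n + 1) v.toNat = min n (v - 1).toNat + 1 := by omega
      rw [hk, List.range_succ_eq_map, List.map_cons, List.map_map]
      have : ((fun (i : Nat) => v - (i : Int)) ∘ Nat.succ) = (fun (i : Nat) => (v - 1) - (i : Int)) := by
        funext i; simp; ring
      rw [this]
      simp
    · rw [pvDown1, if_neg hv]
      have hk : min (n + 1) v.toNat = 0 := by omega
      rw [hk]; simp

-- B's unconditional descending loop: n values v, v-s, …, v-(n-1)s.
theorem pvDown2_eq (s : Int) (n : Nat) : ∀ (v : Int) (out : List Int),
    pvDown2 s v n out = out ++ (List.range n).map (fun (i : Nat) => v - s * (i : Int)) := by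
  induction n with
  | zero => intro v out; simp [pvDown2]
  | succ n ih =>
    intro v out
    rw [pvDown2, ih, List.range_succ_eq_map, List.map_cons, List.map_map]
    have : ((fun (i : Nat) => v - s * (i : Int)) ∘ Nat.succ) = (fun (i : Nat) => (v - s) - s * (i : Int)) := by
      funext i; simp; ring
    rw [this]
    simp

-- ===== VERDICT (by name: the statement is the Claim_ definition above) =====
theorem generate_increasing_spec : Claim_equal_generate_increasing := by
  intro q m _
  unfold Spec_generate_increasing generate_increasing generate_increasing_alt
  by_cases hq0 : q ≤ 0
  · by_cases hq : q = 0
    · simp [hq]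
    · have h1 : (q == 0) = false := by simp [hq]
      have hqt : q.toNat = 0 := by omega
      rw [h1]
      simp only [Bool.false_eq_true, if_false]
      rw [PySem.List.pyRange_one_eq_nil (by omega : q ≤ 0), hqt]
      by_cases hb : m - q < 0
      · rw [if_pos hb, if_pos (by omega : m < q)]
        simp [pvDown1]
      · rw [if_neg hb, if_neg (by omega : ¬ m < q)]
        simp [pvDown2]
  · rw [not_le] at hq0
    have hqne : (q == 0) = false := by simp; omega
    rw [hqne]
    simp only [Bool.false_eq_true, if_false]
    rw [PySem.List.pyRange_one, List.foldl_map]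
    set n : Nat := q.toNat with hn
    have hnq : (n : Int) = q := by omega
    have hsub : (q - 0).toNat = n := by omega
    rw [hsub]
    by_cases hb : m - q < 0
    · -- crowded branch: maximum < quantity
      rw [if_pos hb, if_pos (by omega : m < q)]
      rw [pvLoopA]
      simp only [List.nil_append]
      rw [pvDown1_eq]
      simp only [List.nil_append]
      set k : Nat := min n m.toNat with hk
      have hkn : k ≤ n := by omega
      rw [List.reverse_append, List.reverse_replicate]
      apply List.ext_getElem
      · simp [hkn]
      · intro i h1 h2
        have hi : i < n := by simpa using h1
        have hlenrep : (List.replicate (n - ((List.range k).map (fun (i : Nat) => m - (i : Int))).length) (0 : Int)).length = n - k := by simp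
        rw [List.getElem_map, List.getElem_range]
        by_cases hlt : i < n - k
        · rw [List.getElem_append_left (by simpa using hlt)]
          rw [List.getElem_replicate]
          have hle : m - (q - 1) + 1 * (i : Int) ≤ 0 := by
            have : (i : Int) < (n : Int) - (k : Int) := by exact_mod_cast hlt
            omega
          split_ifs <;> omega
        · rw [List.getElem_append_right (by simpa using hlt)]
          simp only [hlenrep]
          rw [List.getElem_reverse]
          rw [List.getElem_map, List.getElem_range]
          have hjlen : ((List.range k).map (fun (i : Nat) => m - (i : Int))).length = k := by simp
          have hik : i - (n - k) < k := by omega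
          have hval : m - ((k - 1 - (i - (n - k)) : Nat) : Int) = m - (q - 1) + 1 * (i : Int) := by
            have h1' : ((k - 1 - (i - (n - k)) : Nat) : Int) = (k : Int) - 1 - ((i : Int) - ((n : Int) - (k : Int))) := by
              omega
            rw [h1']; omega
          have hpos : ¬ m - (q - 1) + 1 * (i : Int) < 0 := by
            have h2' : (0 : Int) < m - ((k - 1 - (i - (n - k)) : Nat) : Int) := by
              have : ((k - 1 - (i - (n - k)) : Nat) : Int) < (m.toNat : Int) := by omega
              omega
            omega
          rw [if_neg hpos]; simp only [List.length_map, List.length_range]; omega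
    · -- spread branch: quantity ≤ maximum, step = floor(maximum/quantity) ≥ 1
      rw [if_neg hb, if_neg (by omega : ¬ m < q)]
      rw [pvLoopA]
      simp only [List.nil_append]
      rw [pvDown2_eq]
      simp only [List.nil_append]
      set s : Int := PySem.Int.floordiv m q with hs
      have hs1 : 1 ≤ s := by
        rw [hs]
        unfold PySem.Int.floordiv
        rw [Int.fdiv_eq_ediv, if_pos (Or.inl (by omega : (0:Int) ≤ q))]
        have := (Int.le_ediv_iff_mul_le (by omega : (0:Int) < q)).2
          (by omega : (1:Int) * q ≤ m)
        omega
      apply List.ext_getElem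
      · simp
      · intro i h1 h2
        have hi : i < n := by simpa using h1
        rw [List.getElem_map, List.getElem_range, List.getElem_reverse, List.getElem_map]
        simp only [List.length_map, List.length_range]
        rw [List.getElem_range]
        have hcast : ((n - 1 - i : Nat) : Int) = (n : Int) - 1 - (i : Int) := by omega
        have hpos : ¬ s + s * (i : Int) < 0 := by
          have : (0 : Int) ≤ s * (i : Int) := by positivity
          omega
        rw [if_neg hpos, hcast, hnq]
        ring
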